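-- pv_equiv track=rewrite | github.com/yikyungkim/CBR-FinQA | case_retriever/sampling.py | arguments
-- ===== SOURCE A (Python) =====
-- def arguments(program, constants):
--     args=[]
--     i=0
--     while i < len(program):
--         if i%4==1:
--             if program[i] not in constants:
--                 args.append('arg1')
--             else:
--                 # args.append(program[i])
--                 if 'const' in program[i]:
--                     args.append('const')
--                 else:
--                     args.append(program[i])
--         elif i%4==2:
--             if program[i] not in constants:
--                 args.append('arg2')
--             else:
--                 # args.append(program[i])
--                 if 'const' in program[i]:
--                     args.append('const')
--                 else:
--                     args.append(program[i])
--         i+=1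
--     return args
-- ===== SOURCE B (Python) =====
-- def _classify(tok, default, constants):
--     if tok not in constants:
--         return default
--     return 'const' if 'const' in tok else tok
--
-- def arguments(program, constants):
--     firsts = [_classify(t, 'arg1', constants) for t in program[1::4]]
--     seconds = [_classify(t, 'arg2', constants) for t in program[2::4]]
--     out = []
--     for x, y in zip(firsts, seconds):
--         out.append(x)
--         out.append(y)
--     out.extend(firsts[len(seconds):])
--     return out
-- ===== Notes on version B (the rewrite author's own statement) =====
-- stated objective: alternative
-- what changed: B replaces A's single index walk with mod-4 branching by two staged passes: it extracts the strided slices program[1::4] and program[2::4], classifies each slice separately, and then interleaves the two classified lists (appending the leftover first-slot tail).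
import Mathlib
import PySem

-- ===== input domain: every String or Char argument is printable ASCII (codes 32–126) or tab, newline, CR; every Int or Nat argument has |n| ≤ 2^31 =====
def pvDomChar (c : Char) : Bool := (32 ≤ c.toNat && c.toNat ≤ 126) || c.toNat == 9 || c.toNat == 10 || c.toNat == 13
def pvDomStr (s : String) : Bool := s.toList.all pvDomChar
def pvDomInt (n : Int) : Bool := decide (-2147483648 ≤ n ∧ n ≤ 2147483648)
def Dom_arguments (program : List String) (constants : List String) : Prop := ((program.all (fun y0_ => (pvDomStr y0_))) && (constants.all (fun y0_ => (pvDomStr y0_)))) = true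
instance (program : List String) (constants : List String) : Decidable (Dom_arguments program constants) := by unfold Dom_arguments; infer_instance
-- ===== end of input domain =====

-- B replaces A's single index walk (mod-4 branching) by two staged passes over the
-- strided slices program[1::4] and program[2::4], classified separately and then
-- interleaved (objective: alternative).

-- ===== PORT A =====
-- A's while loop: one index at a time, branching on i % 4 (the loop guard makes the
-- index in range, so getD's default is never read).
def argumentsLoopA (program constants : List String) (i : Nat) (args : List String) : List String :=
  if i < program.length then
    let args' :=
      if i % 4 = 1 then
        if program.getD i "" ∉ constants then args ++ ["arg1"]
        else if PySem.Str.isIn "const" (program.getD i "") then args ++ ["const"]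
        else args ++ [program.getD i ""]
      else if i % 4 = 2 then
        if program.getD i "" ∉ constants then args ++ ["arg2"]
        else if PySem.Str.isIn "const" (program.getD i "") then args ++ ["const"]
        else args ++ [program.getD i ""]
      else args
    argumentsLoopA program constants (i + 1) args'
  else args
termination_by program.length - i

def arguments (program : List String) (constants : List String) : List String :=
  argumentsLoopA program constants 0 []

-- ===== PORT B =====
-- Source B's _classify helper.
def classifyB (tok default : String) (constants : List String) : String :=
  if tok ∉ constants then default
  else if PySem.Str.isIn "const" tok then "const"
  else tok

-- Hand port of a positive-step slice: xs[j::4] = stride4 (xs.drop j). Exact for step 4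
-- and a non-negative start j ≤ len(xs): Python takes the element at the start and then
-- every 4th following one until the list ends.
def stride4 : List String → List String
  | [] => []
  | x :: rest => x :: stride4 (rest.drop 3)
termination_by l => l.length
decreasing_by simp

-- Source B: two classified strided slices, interleaved by the zip loop, then the leftover
-- tail firsts[len(seconds):] (a non-negative-start slice = drop, per slice_from).
def arguments_alt (program : List String) (constants : List String) : List String :=
  let firsts := (stride4 (program.drop 1)).map (fun t => classifyB t "arg1" constants)
  let seconds := (stride4 (program.drop 2)).map (fun t => classifyB t "arg2" constants)
  let out := (firsts.zip seconds).foldl (fun acc xy => acc ++ [xy.1] ++ [xy.2]) []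
  out ++ firsts.drop seconds.length

-- ===== PRECONDITION & SPEC =====
def Spec_arguments (program : List String) (constants : List String) (out : List String) : Prop := out = arguments_alt program constants
instance (program : List String) (constants : List String) (out : List String) : Decidable (Spec_arguments program constants out) := by unfold Spec_arguments; infer_instance

-- ===== CLAIM (what is proved, stated in full; the proofs are below) =====
def Claim_equal_arguments : Prop := ∀ (program : List String) (constants : List String), Dom_arguments program constants → Spec_arguments program constants (arguments program constants)

-- ===== LEMMAS AND PROOFS =====

-- Common reference shape: one operation block of four tokens yields its two classified
-- argument slots.
def specRec (c : List String) : List String → List String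
  | _ :: x1 :: x2 :: _ :: rest =>
      classifyB x1 "arg1" c :: classifyB x2 "arg2" c :: specRec c rest
  | [_, x1, x2] => [classifyB x1 "arg1" c, classifyB x2 "arg2" c]
  | [_, x1] => [classifyB x1 "arg1" c]
  | _ => []

lemma stride4_nil : stride4 [] = [] := by rw [stride4]

lemma stride4_cons (x : String) (rest : List String) :
    stride4 (x :: rest) = x :: stride4 (rest.drop 3) := by rw [stride4]

lemma loopA_of_ge (p c : List String) (i : Nat) (args : List String)
    (h : p.length ≤ i) : argumentsLoopA p c i args = args := by
  rw [argumentsLoopA]; simp [Nat.not_lt.mpr h]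

lemma inline_eq_classify (tok d : String) (c args : List String) :
    (if tok ∉ c then args ++ [d]
     else if PySem.Str.isIn "const" tok then args ++ ["const"]
     else args ++ [tok]) = args ++ [classifyB tok d c] := by
  unfold classifyB; split_ifs <;> rfl

lemma stepA_skip (p c : List String) (i : Nat) (args : List String)
    (h : i < p.length) (h1 : i % 4 ≠ 1) (h2 : i % 4 ≠ 2) :
    argumentsLoopA p c i args = argumentsLoopA p c (i + 1) args := by
  rw [argumentsLoopA, if_pos h]; simp only [if_neg h1, if_neg h2]

lemma stepA_arg1 (p c : List String) (i : Nat) (args : List String)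
    (h : i < p.length) (h1 : i % 4 = 1) :
    argumentsLoopA p c i args
      = argumentsLoopA p c (i + 1) (args ++ [classifyB (p.getD i "") "arg1" c]) := by
  rw [argumentsLoopA, if_pos h]; simp only [if_pos h1, inline_eq_classify]

lemma stepA_arg2 (p c : List String) (i : Nat) (args : List String)
    (h : i < p.length) (h1 : i % 4 ≠ 1) (h2 : i % 4 = 2) :
    argumentsLoopA p c i args
      = argumentsLoopA p c (i + 1) (args ++ [classifyB (p.getD i "") "arg2" c]) := by
  rw [argumentsLoopA, if_pos h]; simp only [if_neg h1, if_pos h2, inline_eq_classify]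

lemma getD_drop (p : List String) (i j : Nat) :
    (p.drop i).getD j "" = p.getD (i + j) "" := by
  simp [List.getD_eq_getElem?_getD, List.getElem?_drop]

-- A's loop from a block-aligned index produces the classified slots of the remaining suffix.
lemma loopA_eq_specRec (p c : List String) :
    ∀ (k i : Nat) (args : List String), p.length ≤ i + k → i % 4 = 0 →
      argumentsLoopA p c i args = args ++ specRec c (p.drop i) := by
  intro k
  induction k with
  | zero =>
    intro i args hk _
    rw [loopA_of_ge p c i args (by omega)]
    simp [List.drop_eq_nil_of_le (by omega : p.length ≤ i), specRec]
  | succ k ih =>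
    intro i args hk hi
    by_cases h0 : i < p.length
    · have hd : (p.drop i).length = p.length - i := by simp
      rcases hdrop : p.drop i with _ | ⟨x0, _ | ⟨x1, _ | ⟨x2, _ | ⟨x3, rest⟩⟩⟩⟩
      · exfalso; rw [hdrop] at hd; simp at hd; omega
      all_goals rw [hdrop] at hd; simp at hd
      · -- p = … with exactly one token left: the slot indices are out of range
        rw [stepA_skip p c i args h0 (by omega) (by omega),
            loopA_of_ge p c (i + 1) args (by omega)]
        simp [specRec]
      · -- two tokens left: only the arg1 slot exists
        have g1 : p.getD (i + 1) "" = x1 := by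
          rw [← getD_drop, hdrop]; rfl
        rw [stepA_skip p c i args h0 (by omega) (by omega),
            stepA_arg1 p c (i + 1) args (by omega) (by omega), g1,
            loopA_of_ge p c (i + 1 + 1) _ (by omega)]
        simp [specRec]
      · -- three tokens left: arg1 and arg2 slots
        have g1 : p.getD (i + 1) "" = x1 := by rw [← getD_drop, hdrop]; rfl
        have g2 : p.getD (i + 2) "" = x2 := by rw [← getD_drop, hdrop]; rfl
        rw [stepA_skip p c i args h0 (by omega) (by omega),
            stepA_arg1 p c (i + 1) args (by omega) (by omega), g1,
            show i + 1 + 1 = i + 2 by omega,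
            stepA_arg2 p c (i + 2) _ (by omega) (by omega) (by omega), g2,
            loopA_of_ge p c (i + 2 + 1) _ (by omega)]
        simp [specRec]
      · -- a full block: four index steps of A, then the induction hypothesis
        have g1 : p.getD (i + 1) "" = x1 := by rw [← getD_drop, hdrop]; rfl
        have g2 : p.getD (i + 2) "" = x2 := by rw [← getD_drop, hdrop]; rfl
        have hrest : p.drop (i + 4) = rest := by
          have : p.drop (i + 4) = (p.drop i).drop 4 := by
            rw [List.drop_drop]
          rw [this, hdrop]; rfl
        rw [stepA_skip p c i args h0 (by omega) (by omega),
            stepA_arg1 p c (i + 1) args (by omega) (by omega), g1,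
            show i + 1 + 1 = i + 2 by omega,
            stepA_arg2 p c (i + 2) _ (by omega) (by omega) (by omega), g2,
            show i + 2 + 1 = i + 3 by omega,
            stepA_skip p c (i + 3) _ (by omega) (by omega) (by omega),
            show i + 3 + 1 = i + 4 by omega,
            ih (i + 4) _ (by omega) (by omega), hrest]
        simp [specRec]
    · rw [loopA_of_ge p c i args (by omega)]
      simp [List.drop_eq_nil_of_le (by omega : p.length ≤ i), specRec]

lemma foldl_pairs_append (l : List (String × String)) (init : List String) :
    l.foldl (fun acc xy => acc ++ [xy.1] ++ [xy.2]) init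
      = init ++ l.foldl (fun acc xy => acc ++ [xy.1] ++ [xy.2]) [] := by
  induction l generalizing init with
  | nil => simp
  | cons xy t ih =>
    simp only [List.foldl_cons]
    rw [ih, ih ([] ++ [xy.1] ++ [xy.2])]
    simp

-- B's staged slices-and-interleave computes the same classified slots.
lemma alt_eq_specRec (c : List String) :
    ∀ (n : Nat) (p : List String), p.length ≤ n → arguments_alt p c = specRec c p := by
  intro n
  induction n with
  | zero =>
    intro p hp
    have : p = [] := by cases p <;> simp_all
    subst this; simp [arguments_alt, stride4_nil, specRec]
  | succ n ih =>
    intro p hp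
    rcases p with _ | ⟨x0, _ | ⟨x1, _ | ⟨x2, _ | ⟨x3, rest⟩⟩⟩⟩
    · simp [arguments_alt, stride4_nil, specRec]
    · simp [arguments_alt, stride4_nil, specRec]
    · simp [arguments_alt, stride4_nil, stride4_cons, specRec]
    · simp [arguments_alt, stride4_nil, stride4_cons, specRec]
    · -- p = x0 :: x1 :: x2 :: x3 :: rest : both slices gain one head element,
      -- the interleaving emits the block's two slots and recurses on rest
      have hlen : rest.length ≤ n := by simp at hp; omega
      have hrest := ih rest (by omega)
      simp only [arguments_alt] at hrest ⊢
      -- normalise the strided slices: each gains one head element over those of rest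
      simp only [List.drop_succ_cons, List.drop_zero, stride4_cons,
                 List.map_cons, List.zip_cons_cons, List.foldl_cons, List.length_cons] at hrest ⊢
      rw [foldl_pairs_append _ ([] ++ [classifyB x1 "arg1" c] ++ [classifyB x2 "arg2" c]),
          specRec]
      simp only [List.nil_append, List.cons_append, List.append_assoc] at hrest ⊢
      rw [hrest]

-- ===== VERDICT (by name: the statement is the Claim_ definition above) =====
theorem arguments_spec : Claim_equal_arguments := by
  intro program constants _
  unfold Spec_arguments arguments
  rw [loopA_eq_specRec program constants program.length 0 [] (by omega) (by omega)]
  rw [alt_eq_specRec constants program.length program (le_refl _)]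
  simp
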